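-- pv_equiv track=rewrite | github.com/mborkow5/Scrabble-PIPR | game/bot.py | exchange_duplicates
-- ===== SOURCE A (Python) =====
-- def exchange_duplicates(hand):
--     to_exchange = []
--     for tile_id in range(len(hand)):
--         if (hand[tile_id] != "" and hand[tile_id] in hand[tile_id + 1 : 7]) or hand[
--             tile_id
--         ] == " ":
--             to_exchange.append(tile_id)
--     return to_exchange
-- ===== SOURCE B (Python) =====
-- def exchange_duplicates(hand):
--     # Group-by approach: collect blank-tile indices, then for each distinct tile
--     # value in the first-7 window drop the last occurrence and flag the rest;
--     # finally sort the union back into ascending index order.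
--     flagged = [i for i, t in enumerate(hand) if t == " "]
--     window = hand[:7]
--     for t in dict.fromkeys(window):
--         if t != "" and t != " ":
--             occs = [j for j, u in enumerate(window) if u == t]
--             flagged.extend(occs[:-1])
--     return sorted(flagged)
-- ===== Notes on version B (the rewrite author's own statement) =====
-- stated objective: alternative
-- what changed: Instead of testing each index against a forward slice, B groups occurrences: it collects blank-tile indices in one comprehension, then for each distinct tile value in the first-7 window flags every occurrence except the last (occs[:-1]), and sorts the union back into index order.
import Mathlib
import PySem

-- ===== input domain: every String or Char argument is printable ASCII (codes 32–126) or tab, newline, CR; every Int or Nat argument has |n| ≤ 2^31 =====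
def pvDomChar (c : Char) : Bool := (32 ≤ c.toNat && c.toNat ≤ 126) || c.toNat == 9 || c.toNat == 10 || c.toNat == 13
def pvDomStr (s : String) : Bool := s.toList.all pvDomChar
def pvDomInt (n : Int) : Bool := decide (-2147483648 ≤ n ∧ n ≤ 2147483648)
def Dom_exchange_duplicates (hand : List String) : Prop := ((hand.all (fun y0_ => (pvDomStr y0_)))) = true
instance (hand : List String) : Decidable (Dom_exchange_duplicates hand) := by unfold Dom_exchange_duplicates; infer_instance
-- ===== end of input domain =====

-- B replaces A's per-index forward-slice membership test with a group-by pass: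
-- blank indices are collected directly, each distinct tile value of the first-7
-- window contributes all its occurrences but the last, and the union is sorted
-- back into index order (alternative decomposition, similar cost).

-- ===== PORT A =====
def exchange_duplicates (hand : List String) : List Int :=
  (PySem.List.pyRange 0 (hand.length : Int) 1).foldl
    (fun acc i =>
      if (PySem.List.pyGetD hand i "" ≠ "" ∧
          PySem.List.pyGetD hand i "" ∈ PySem.List.slice hand (some (i + 1)) (some 7)) ∨
         PySem.List.pyGetD hand i "" = " "
      then acc ++ [i] else acc) []

-- ===== PORT B =====
-- flagged = [i for i, t in enumerate(hand) if t == " "]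
-- window = hand[:7]; for t in dict.fromkeys(window): if t not blank/empty:
--   occs = [j for j, u in enumerate(window) if u == t]; flagged.extend(occs[:-1])
-- return sorted(flagged)
def exchange_duplicates_alt (hand : List String) : List Int :=
  let spaces := ((PySem.List.enumerate hand).filter (fun p => p.2 == " ")).map (·.1)
  let window := PySem.List.slice hand none (some 7)
  let flagged := (PySem.List.dedup window).foldl
    (fun acc t =>
      if t ≠ "" ∧ t ≠ " " then
        acc ++ PySem.List.slice
          (((PySem.List.enumerate window).filter (fun p => p.2 == t)).map (·.1))
          none (some (-1))
      else acc) spaces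
  PySem.List.sorted flagged (fun x => x) false

-- ===== PRECONDITION & SPEC =====
def Spec_exchange_duplicates (hand : List String) (out : List Int) : Prop := out = exchange_duplicates_alt hand
instance (hand : List String) (out : List Int) : Decidable (Spec_exchange_duplicates hand out) := by unfold Spec_exchange_duplicates; infer_instance

-- ===== CLAIM (what is proved, stated in full; the proofs are below) =====
def Claim_equal_exchange_duplicates : Prop := ∀ (hand : List String), Dom_exchange_duplicates hand → Spec_exchange_duplicates hand (exchange_duplicates hand)

-- ===== LEMMAS AND PROOFS =====

-- The flag condition, as a predicate on a Nat index.
abbrev flagP (hand : List String) (j : Nat) : Prop :=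
  hand.getD j "" = " " ∨
  (hand.getD j "" ≠ "" ∧ ∃ k : Nat, k < min hand.length 7 ∧ j < k ∧ hand.getD k "" = hand.getD j "")

-- The common normal form both ports are reduced to.
def target (hand : List String) : List Int :=
  ((List.range hand.length).filter (fun j => decide (flagP hand j))).map (fun j => ((j : Nat) : Int))

-- Membership in hand[j+1:7] is existence of a later matching index below min(len,7).
lemma mem_slice_iff (hand : List String) (j : Nat) (t : String) :
    t ∈ PySem.List.slice hand (some ((j : Int) + 1)) (some 7) ↔
    ∃ k : Nat, k < min hand.length 7 ∧ j < k ∧ hand.getD k "" = t := by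
  have h1 : ((j : Int) + 1) = (((j + 1 : Nat)) : Int) := by push_cast; ring
  have h7 : (7 : Int) = ((7 : Nat) : Int) := rfl
  rw [h1, h7, PySem.List.slice_natCast, List.mem_iff_getElem]
  constructor
  · rintro ⟨k, hk, hget⟩
    have hlen := hk
    rw [List.length_take, List.length_drop] at hlen
    refine ⟨j + 1 + k, by omega, by omega, ?_⟩
    rw [List.getElem_take, List.getElem_drop] at hget
    rw [List.getD_eq_getElem hand "" (by omega)]
    exact hget
  · rintro ⟨k, hk7, hjk, hget⟩
    refine ⟨k - (j + 1), ?_, ?_⟩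
    · rw [List.length_take, List.length_drop]; omega
    · rw [List.getElem_take, List.getElem_drop]
      rw [List.getD_eq_getElem hand "" (by omega)] at hget
      have hkk : j + 1 + (k - (j + 1)) = k := by omega
      simp only [hkk]
      exact hget

-- A's port equals the normal form.
lemma a_eq_target (hand : List String) : exchange_duplicates hand = target hand := by
  unfold exchange_duplicates target
  rw [show ((hand.length : Int)) = ((hand.length : Nat) : Int) from rfl,
    PySem.List.pyRange_zero_natCast, List.foldl_map]
  have h1 : (List.range hand.length).foldl
      (fun (acc : List Int) (k : Nat) =>
        if (PySem.List.pyGetD hand ((k : Nat) : Int) "" ≠ "" ∧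
            PySem.List.pyGetD hand ((k : Nat) : Int) "" ∈
              PySem.List.slice hand (some (((k : Nat) : Int) + 1)) (some 7)) ∨
           PySem.List.pyGetD hand ((k : Nat) : Int) "" = " "
        then acc ++ [((k : Nat) : Int)] else acc) []
      = (List.range hand.length).foldl
      (fun (acc : List Int) (k : Nat) =>
        if (fun j => decide (flagP hand j)) k = true
        then acc ++ [((k : Nat) : Int)] else acc) [] := by
    apply PySem.List.foldl_congr_mem
    intro acc k _
    simp only [PySem.List.pyGetD_natCast]
    refine if_congr ?_ rfl rfl
    rw [decide_eq_true_eq]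
    unfold flagP
    rw [mem_slice_iff]
    exact or_comm
  rw [h1, PySem.List.foldl_append_if]
  simp

lemma mem_idxs (xs : List String) (t : String) (x : Int) :
    x ∈ (((PySem.List.enumerate xs).filter (fun p => p.2 == t)).map (·.1)) ↔
    ∃ k : Nat, k < xs.length ∧ xs.getD k "" = t ∧ x = (k : Int) := by
  constructor
  · rintro hx
    rw [List.mem_map] at hx
    obtain ⟨p, hp, hx⟩ := hx
    rw [List.mem_filter] at hp
    obtain ⟨hpe, hpt⟩ := hp
    rw [PySem.List.mem_enumerate_iff] at hpe
    obtain ⟨k, hk, rfl⟩ := hpe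
    refine ⟨k, hk, ?_, by simpa using hx.symm⟩
    rw [List.getD_eq_getElem _ _ hk]
    exact beq_iff_eq.mp hpt
  · rintro ⟨k, hk, ht, rfl⟩
    rw [List.mem_map]
    refine ⟨((k : Int), xs[k]), ?_, by simp⟩
    rw [List.mem_filter]
    constructor
    · rw [PySem.List.mem_enumerate_iff]
      exact ⟨k, hk, by simp⟩
    · rw [List.getD_eq_getElem _ _ hk] at ht
      simpa using ht

lemma pairwise_idxs (xs : List String) (q : Int × String → Bool) :
    ((((PySem.List.enumerate xs).filter q).map (·.1)) : List Int).Pairwise (· < ·) :=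
  ((PySem.List.pairwise_lt_enumerate xs 0).filter q).map _ (fun _ _ h => h)

lemma mem_dropLast_of_pairwise_lt {l : List Int} (h : l.Pairwise (· < ·)) (x : Int) :
    x ∈ l.dropLast ↔ x ∈ l ∧ ∃ y ∈ l, x < y := by
  induction l with
  | nil => simp
  | cons a tl ih =>
    cases tl with
    | nil =>
      show x ∈ ([] : List Int) ↔ _
      constructor
      · intro hx; exact absurd hx (by simp)
      · rintro ⟨hxm, y, hy, hxy⟩
        rcases List.mem_cons.mp hxm with rfl | hm
        · rcases List.mem_cons.mp hy with rfl | hy' <;> simp_all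
        · exact absurd hm (by simp)
    | cons b tl2 =>
      rw [List.dropLast_cons₂]
      have ha : ∀ y ∈ b :: tl2, a < y := (List.pairwise_cons.mp h).1
      have ihh := ih (List.Pairwise.of_cons h)
      constructor
      · intro hx
        rcases List.mem_cons.mp hx with rfl | hx'
        · exact ⟨by simp, b, by simp, ha b (by simp)⟩
        · obtain ⟨hm, y, hy, hxy⟩ := ihh.mp hx'
          exact ⟨List.mem_cons_of_mem _ hm, y, List.mem_cons_of_mem _ hy, hxy⟩
      · rintro ⟨hxm, y, hy, hxy⟩
        rcases List.mem_cons.mp hxm with rfl | hm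
        · exact by simp
        · apply List.mem_cons_of_mem
          apply ihh.mpr
          refine ⟨hm, ?_⟩
          rcases List.mem_cons.mp hy with rfl | hy'
          · exact absurd (ha x hm) (by omega)
          · exact ⟨y, hy', hxy⟩

-- B's port equals the normal form.
lemma b_eq_target (hand : List String) : exchange_duplicates_alt hand = target hand := by
  unfold exchange_duplicates_alt
  have hw : PySem.List.slice hand none (some 7) = hand.take 7 :=
    PySem.List.slice_to hand (by norm_num)
  rw [hw]
  set w : List String := hand.take 7 with hwdef
  show PySem.List.sorted ((PySem.List.dedup w).foldl
      (fun acc t =>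
        if t ≠ "" ∧ t ≠ " " then
          acc ++ PySem.List.slice
            (((PySem.List.enumerate w).filter (fun p => p.2 == t)).map (·.1))
            none (some (-1))
        else acc) (((PySem.List.enumerate hand).filter (fun p => p.2 == " ")).map (·.1)))
      (fun x => x) = target hand
  have hwlen : w.length = min 7 hand.length := by rw [hwdef, List.length_take]
  have hwg : ∀ j : Nat, j < w.length → w.getD j "" = hand.getD j "" := by
    intro j hj
    have hj' : j < hand.length := by
      rw [hwlen] at hj; omega
    rw [List.getD_eq_getElem _ _ hj, List.getD_eq_getElem _ _ hj']
    exact List.getElem_take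
  set g : String → List Int := fun t =>
    if t ≠ "" ∧ t ≠ " " then ((((PySem.List.enumerate w).filter (fun p => p.2 == t)).map (·.1)) : List Int).dropLast
    else [] with hg
  set spaces : List Int := ((PySem.List.enumerate hand).filter (fun p => p.2 == " ")).map (·.1) with hs
  have h1 : (PySem.List.dedup w).foldl
      (fun acc t =>
        if t ≠ "" ∧ t ≠ " " then
          acc ++ PySem.List.slice
            (((PySem.List.enumerate w).filter (fun p => p.2 == t)).map (·.1))
            none (some (-1))
        else acc) spaces = spaces ++ (PySem.List.dedup w).flatMap g := by
    rw [← PySem.List.foldl_append_eq_flatMap]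
    apply PySem.List.foldl_congr_mem
    intro acc t _
    rw [PySem.List.slice_to_neg_one]
    simp only [hg]
    by_cases hc : t ≠ "" ∧ t ≠ " "
    · rw [if_pos hc, if_pos hc]
    · rw [if_neg hc, if_neg hc, List.append_nil]
  rw [h1]
  -- helper facts about group members
  have hval : ∀ (t : String) (x : Int), x ∈ g t →
      t ≠ " " ∧ ∃ j : Nat, j < w.length ∧ w.getD j "" = t ∧ x = (j : Int) := by
    intro t x hx
    simp only [hg] at hx
    by_cases hc : t ≠ "" ∧ t ≠ " "
    · rw [if_pos hc] at hx
      have hx' := ((mem_dropLast_of_pairwise_lt (pairwise_idxs w _) x).mp hx).1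
      exact ⟨hc.2, (mem_idxs w t x).mp hx'⟩
    · rw [if_neg hc] at hx; exact absurd hx (by simp)
  -- target properties
  have hpt : (target hand).Pairwise (fun a b => a < b) := by
    unfold target
    exact List.Pairwise.map _ (fun a b h => by exact_mod_cast h)
      (List.Pairwise.filter _ List.pairwise_lt_range)
  have hnt : (target hand).Nodup := hpt.imp (fun h => ne_of_lt h)
  have hmt : ∀ x, x ∈ target hand ↔ ∃ j : Nat, j < hand.length ∧ flagP hand j ∧ x = (j : Int) := by
    intro x
    unfold target
    simp only [List.mem_map, List.mem_filter, List.mem_range, decide_eq_true_eq]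
    constructor
    · rintro ⟨j, ⟨hj, hf⟩, rfl⟩; exact ⟨j, hj, hf, rfl⟩
    · rintro ⟨j, hj, hf, rfl⟩; exact ⟨j, ⟨hj, hf⟩, rfl⟩
  -- flagged properties
  have hnf : (spaces ++ (PySem.List.dedup w).flatMap g).Nodup := by
    rw [List.nodup_append]
    refine ⟨(pairwise_idxs hand _).imp (fun h => ne_of_lt h), ?_, ?_⟩
    · rw [List.nodup_flatMap]
      constructor
      · intro t _
        simp only [hg]
        split
        · exact (List.dropLast_sublist _).nodup ((pairwise_idxs w _).imp (fun h => ne_of_lt h))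
        · exact List.nodup_nil
      · refine (PySem.List.nodup_dedup w).imp (fun {t t'} hne => ?_)
        intro x hx hx'
        obtain ⟨-, j, hj, hwj, rfl⟩ := hval _ _ hx
        obtain ⟨-, j', hj', hwj', hjj⟩ := hval _ _ hx'
        have : j = j' := by exact_mod_cast hjj
        exact hne (hwj ▸ hwj' ▸ this ▸ rfl)
    · intro x hx y hy
      obtain ⟨k, hk, hgk, rfl⟩ := (mem_idxs hand " " _).mp hx
      rw [List.mem_flatMap] at hy
      obtain ⟨t, -, hxt⟩ := hy
      obtain ⟨hts, j, hj, hwj, rfl⟩ := hval _ _ hxt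
      intro heq
      have hjk : j = k := by exact_mod_cast heq.symm
      exact hts (by rw [← hwj, hwg j hj, hjk, hgk])
  have hmf : ∀ x, x ∈ spaces ++ (PySem.List.dedup w).flatMap g ↔
      ∃ j : Nat, j < hand.length ∧ flagP hand j ∧ x = (j : Int) := by
    intro x
    rw [List.mem_append, List.mem_flatMap]
    constructor
    · rintro (hx | ⟨t, ht, hxt⟩)
      · obtain ⟨k, hk, hgk, rfl⟩ := (mem_idxs hand " " _).mp hx
        exact ⟨k, hk, Or.inl hgk, rfl⟩
      · have hc : t ≠ "" ∧ t ≠ " " := by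
          simp only [hg] at hxt; by_contra hc; rw [if_neg hc] at hxt; exact absurd hxt (by simp)
        simp only [hg] at hxt
        rw [if_pos hc] at hxt
        obtain ⟨hxo, y, hy, hxy⟩ := (mem_dropLast_of_pairwise_lt (pairwise_idxs w _) x).mp hxt
        obtain ⟨j, hj, hwj, rfl⟩ := (mem_idxs w t _).mp hxo
        obtain ⟨k, hk, hwk, rfl⟩ := (mem_idxs w t _).mp hy
        have hjk : j < k := by exact_mod_cast hxy
        have hjn : j < hand.length := by rw [hwlen] at hj; omega
        refine ⟨j, hjn, Or.inr ⟨?_, k, by rw [hwlen] at hk; omega, hjk, ?_⟩, rfl⟩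
        · rw [← hwg j hj, hwj]; exact hc.1
        · rw [← hwg j hj, ← hwg k hk, hwj, hwk]
    · rintro ⟨j, hj, hf, rfl⟩
      rcases hf with hsp | ⟨hne, k, hk, hjk, hkj⟩
      · exact Or.inl ((mem_idxs hand " " _).mpr ⟨j, hj, hsp, rfl⟩)
      · by_cases hts : hand.getD j "" = " "
        · exact Or.inl ((mem_idxs hand " " _).mpr ⟨j, hj, hts, rfl⟩)
        · right
          have hjw : j < w.length := by rw [hwlen]; omega
          have hkw : k < w.length := by rw [hwlen]; omega
          refine ⟨hand.getD j "", ?_, ?_⟩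
          · rw [PySem.List.mem_dedup]
            rw [← hwg j hjw]
            rw [List.getD_eq_getElem _ _ hjw]
            exact List.getElem_mem _
          · simp only [hg]
            rw [if_pos ⟨hne, hts⟩]
            apply (mem_dropLast_of_pairwise_lt (pairwise_idxs w _) _).mpr
            refine ⟨(mem_idxs w _ _).mpr ⟨j, hjw, by rw [hwg j hjw], rfl⟩,
              (k : Int), (mem_idxs w _ _).mpr ⟨k, hkw, by rw [hwg k hkw, hkj], rfl⟩, by exact_mod_cast hjk⟩
  exact PySem.List.sorted_eq_of_perm_of_pairwise_lt _ _ _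
    ((List.perm_ext_iff_of_nodup hnt hnf).mpr (fun a => by rw [hmt, hmf])) hpt

-- ===== VERDICT (by name: the statement is the Claim_ definition above) =====
theorem exchange_duplicates_spec : Claim_equal_exchange_duplicates := by
  unfold Claim_equal_exchange_duplicates Spec_exchange_duplicates
  intro hand _
  rw [a_eq_target, b_eq_target]
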